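-- pv_equiv track=rewrite | github.com/SurajShivakumar/Hum2Harmony | backend/core/midi_refiner.py | _remove_pitch_outliers
-- ===== SOURCE A (Python) =====
-- from typing import Any
--
-- def _remove_pitch_outliers(notes: list[dict[str, Any]], window_half: int = 4, max_dev: int = 9) -> list[dict[str, Any]]:
--     if len(notes) < 3:
--         return notes
--     pitches = [int(n["pitch"]) for n in notes]
--     kept: list[dict[str, Any]] = []
--     for i, n in enumerate(notes):
--         lo = max(0, i - window_half)
--         hi = min(len(notes), i + window_half + 1)
--         med = sorted(pitches[lo:hi])[len(pitches[lo:hi]) // 2]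
--         if abs(pitches[i] - med) <= max_dev:
--             kept.append(n)
--     return kept if kept else notes
-- ===== SOURCE B (Python) =====
-- import bisect
--
--
-- def _remove_pitch_outliers(notes, window_half=4, max_dev=9):
--     if len(notes) < 3:
--         return notes
--     pitches = [int(n["pitch"]) for n in notes]
--     n = len(pitches)
--     # sorted sliding window maintained incrementally instead of re-sorting a slice per note
--     window = sorted(pitches[: window_half + 1])
--     kept = []
--     for i, note in enumerate(notes):
--         med = window[len(window) // 2]
--         if abs(pitches[i] - med) <= max_dev:
--             kept.append(note)
--         j = i + window_half + 1
--         if j < n: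
--             bisect.insort(window, pitches[j])
--         j = i - window_half
--         if j >= 0:
--             window.remove(pitches[j])
--     return kept if kept else notes
-- ===== Notes on version B (the rewrite author's own statement) =====
-- stated objective: faster
-- what changed: Instead of slicing and fully re-sorting the pitch window for every note, B maintains one sorted sliding window incrementally (bisect.insort for the entering pitch, list.remove for the leaving one) and reads the median from it.
import Mathlib
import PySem

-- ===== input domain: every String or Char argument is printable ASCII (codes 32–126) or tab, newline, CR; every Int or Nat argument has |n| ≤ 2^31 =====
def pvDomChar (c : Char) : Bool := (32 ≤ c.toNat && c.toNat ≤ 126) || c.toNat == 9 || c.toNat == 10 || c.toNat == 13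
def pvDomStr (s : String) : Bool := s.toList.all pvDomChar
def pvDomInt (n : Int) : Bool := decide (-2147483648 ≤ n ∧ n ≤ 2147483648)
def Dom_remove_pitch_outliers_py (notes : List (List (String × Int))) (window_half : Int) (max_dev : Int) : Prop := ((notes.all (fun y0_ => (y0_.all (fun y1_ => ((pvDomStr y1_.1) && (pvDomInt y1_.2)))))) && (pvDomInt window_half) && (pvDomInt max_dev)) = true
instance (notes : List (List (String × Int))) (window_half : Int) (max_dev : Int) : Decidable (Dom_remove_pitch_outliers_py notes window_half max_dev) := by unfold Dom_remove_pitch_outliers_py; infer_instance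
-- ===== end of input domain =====

-- B replaces A's per-note slice-and-sort with one incrementally maintained sorted sliding window
-- (insert via bisect, remove the leaving pitch); equivalence is proved on Pre_ (where Python A returns).

-- ===== PORT A =====
-- loop body of A, named so the proofs can speak about one fold step
def pvStepA (pitches : List Int) (n : Int) (window_half : Int) (max_dev : Int)
    (kept : List (List (String × Int))) (p : Int × List (String × Int)) : List (List (String × Int)) :=
  let lo := max 0 (p.1 - window_half)
  let hi := min n (p.1 + window_half + 1)
  let s := PySem.List.slice pitches (some lo) (some hi)
  let med := PySem.List.pyGetD (PySem.List.sorted s (fun x => x)) (PySem.Int.floordiv (s.length : Int) 2) 0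
  if |PySem.List.pyGetD pitches p.1 0 - med| ≤ max_dev then kept ++ [p.2] else kept

def remove_pitch_outliers_py (notes : List (List (String × Int))) (window_half : Int) (max_dev : Int) : List (List (String × Int)) :=
  if notes.length < 3 then notes
  else
    let pitches : List Int := notes.map (fun nt => ((PySem.Dict.mk nt).get? "pitch").getD 0)
    let kept := (PySem.List.enumerate notes).foldl (pvStepA pitches (notes.length : Int) window_half max_dev) []
    if kept = [] then notes else kept

-- ===== PORT B =====
-- loop body of B: state = (sorted window, kept)
def pvStepB (pitches : List Int) (n : Int) (window_half : Int) (max_dev : Int)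
    (st : List Int × List (List (String × Int))) (p : Int × List (String × Int)) :
    List Int × List (List (String × Int)) :=
  let window := st.1
  let med := PySem.List.pyGetD window (PySem.Int.floordiv (window.length : Int) 2) 0
  let kept := if |PySem.List.pyGetD pitches p.1 0 - med| ≤ max_dev then st.2 ++ [p.2] else st.2
  let j := p.1 + window_half + 1
  let window :=
    if j < n then
      PySem.List.insert window ((PySem.List.bisectRight window (PySem.List.pyGetD pitches j 0) : Nat) : Int)
        (PySem.List.pyGetD pitches j 0)
    else window
  let j2 := p.1 - window_half
  let window := if 0 ≤ j2 then (PySem.List.remove? window (PySem.List.pyGetD pitches j2 0)).getD [] else window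
  (window, kept)

def remove_pitch_outliers_py_alt (notes : List (List (String × Int))) (window_half : Int) (max_dev : Int) : List (List (String × Int)) :=
  if notes.length < 3 then notes
  else
    let pitches : List Int := notes.map (fun nt => ((PySem.Dict.mk nt).get? "pitch").getD 0)
    let w0 := PySem.List.sorted (PySem.List.slice pitches none (some (window_half + 1))) (fun x => x)
    let r := (PySem.List.enumerate notes).foldl (pvStepB pitches (pitches.length : Int) window_half max_dev) (w0, [])
    if r.2 = [] then notes else r.2

-- ===== PRECONDITION & SPEC =====
-- Pre_ excludes exactly the inputs where Python A raises: with ≥ 3 notes, a negative window_half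
-- (empty window slice → IndexError) or a note without a "pitch" key (KeyError).
def Pre_remove_pitch_outliers_py (notes : List (List (String × Int))) (window_half : Int) (max_dev : Int) : Prop :=
  notes.length < 3 ∨ (0 ≤ window_half ∧ ∀ nt ∈ notes, ∃ pr ∈ nt, pr.1 = "pitch")
instance (notes : List (List (String × Int))) (window_half : Int) (max_dev : Int) : Decidable (Pre_remove_pitch_outliers_py notes window_half max_dev) := by unfold Pre_remove_pitch_outliers_py; infer_instance

def pvWitness_remove_pitch_outliers_py : (List (List (String × Int))) × Int × Int :=
  ([[("pitch", 60)], [("pitch", 74)], [("pitch", 61)]], 1, 9)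

def Spec_remove_pitch_outliers_py (notes : List (List (String × Int))) (window_half : Int) (max_dev : Int) (out : List (List (String × Int))) : Prop := out = remove_pitch_outliers_py_alt notes window_half max_dev
instance (notes : List (List (String × Int))) (window_half : Int) (max_dev : Int) (out : List (List (String × Int))) : Decidable (Spec_remove_pitch_outliers_py notes window_half max_dev out) := by unfold Spec_remove_pitch_outliers_py; infer_instance

-- ===== CLAIM (what is proved, stated in full; the proofs are below) =====
def Claim_equal_remove_pitch_outliers_py : Prop := ∀ (notes : List (List (String × Int))) (window_half : Int) (max_dev : Int), Dom_remove_pitch_outliers_py notes window_half max_dev → Pre_remove_pitch_outliers_py notes window_half max_dev → Spec_remove_pitch_outliers_py notes window_half max_dev (remove_pitch_outliers_py notes window_half max_dev)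

-- ===== LEMMAS AND PROOFS =====

-- pitches[a:b] of A's window, as plain drop/take on Nat bounds
def pvSeg (P : List Int) (a b : Nat) : List Int := (P.drop a).take (b - a)

lemma pvSeg_succ_right (P : List Int) (a b : Nat) (hab : a ≤ b) (hb : b < P.length) :
    pvSeg P a (b + 1) = pvSeg P a b ++ [P.getD b 0] := by
  unfold pvSeg
  have h1 : b + 1 - a = (b - a) + 1 := by omega
  rw [h1, List.take_add_one]
  have h2 : (P.drop a)[b - a]? = some (P.getD b 0) := by
    rw [List.getElem?_drop]
    have : a + (b - a) = b := by omega
    rw [this, List.getElem?_eq_getElem (by omega), List.getD_eq_getElem _ _ (by omega)]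
  simp [h2]

lemma pvSeg_succ_left (P : List Int) (a b : Nat) (hab : a < b) (ha : a < P.length) :
    pvSeg P a b = P.getD a 0 :: pvSeg P (a + 1) b := by
  unfold pvSeg
  rw [List.drop_eq_getElem_cons ha]
  have h1 : b - a = (b - (a + 1)) + 1 := by omega
  rw [h1, List.take_succ_cons, List.getD_eq_getElem _ _ ha]

lemma pvSorted_eq_of_perm_of_pairwise (w : List Int) (s : List Int)
    (hperm : w.Perm s) (hpw : w.Pairwise (· ≤ ·)) :
    w = PySem.List.sorted s (fun x => x) := by
  apply List.eq_of_perm_of_sorted (le := (· ≤ ·))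
  · intro a b _ _ h1 h2; exact le_antisymm h1 h2
  · exact hpw
  · exact PySem.List.sorted_pairwise s (fun x => x)
  · exact hperm.trans (PySem.List.sorted_perm s (fun x => x) false).symm

-- bisect.insort into a sorted list: stays sorted and is a permutation of v :: w
lemma pvInsort_pairwise_perm (w : List Int) (v : Int) (hw : w.Pairwise (· ≤ ·)) :
    (PySem.List.insert w ((PySem.List.bisectRight w v : Nat) : Int) v).Pairwise (· ≤ ·) ∧
    (PySem.List.insert w ((PySem.List.bisectRight w v : Nat) : Int) v).Perm (v :: w) := by
  obtain ⟨hk, hlt, hge⟩ := PySem.List.bisectRight_spec w v hw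
  set k := PySem.List.bisectRight w v with hkdef
  rw [PySem.List.insert_natCast w k v hk]
  constructor
  · rw [List.pairwise_append]
    refine ⟨hw.sublist (List.take_sublist _ _), ?_, ?_⟩
    · rw [List.pairwise_cons]
      refine ⟨?_, hw.sublist (List.drop_sublist _ _)⟩
      intro b hb
      obtain ⟨j, hj, hbj⟩ := List.mem_iff_getElem.mp hb
      rw [List.getElem_drop] at hbj
      exact le_of_lt (hbj ▸ hge (k + j) (by simp at hj; omega) (by omega))
    · intro a ha b hb
      obtain ⟨j, hj, haj⟩ := List.mem_iff_getElem.mp ha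
      have hjk : j < k := by simp at hj; omega
      rw [List.getElem_take] at haj
      have hav : a ≤ v := haj ▸ hlt j (by simp at hj; omega) hjk
      rcases List.mem_cons.mp hb with rfl | hb'
      · exact hav
      · obtain ⟨j', hj', hbj'⟩ := List.mem_iff_getElem.mp hb'
        rw [List.getElem_drop] at hbj'
        exact le_trans hav (le_of_lt (hbj' ▸ hge (k + j') (by simp at hj'; omega) (by omega)))
  · exact (List.perm_middle).trans (by rw [List.take_append_drop])

-- the sliding-window invariant step: insert-then-remove turns sorted(seg i) into sorted(seg (i+1))
lemma pvWindowStep (P : List Int) (W i : Nat) (hin : i < P.length) (w w1 : List Int)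
    (hw : w = PySem.List.sorted (pvSeg P (i - W) (min P.length (i + W + 1))) (fun x => x))
    (hw1 : w1 = if i + W + 1 < P.length then
         PySem.List.insert w ((PySem.List.bisectRight w (P.getD (i + W + 1) 0) : Nat) : Int) (P.getD (i + W + 1) 0)
       else w) :
    (if W ≤ i then (PySem.List.remove? w1 (P.getD (i - W) 0)).getD [] else w1)
    = PySem.List.sorted (pvSeg P (i + 1 - W) (min P.length (i + 1 + W + 1))) (fun x => x) := by
  set n := P.length with hn
  set lo := i - W with hlo
  set hi := min n (i + W + 1) with hhi
  set hi' := min n (i + W + 2) with hhi'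
  have hloi : lo ≤ i := by omega
  have hihi : i < hi := by omega
  have hhin : hi ≤ n := by omega
  have hwp : w.Pairwise (· ≤ ·) := hw ▸ PySem.List.sorted_pairwise _ _
  have hwperm : w.Perm (pvSeg P lo hi) := hw ▸ PySem.List.sorted_perm _ _ _
  -- after the insert: w1 is sorted and a permutation of pvSeg lo hi'
  have hmid : w1.Pairwise (· ≤ ·) ∧ w1.Perm (pvSeg P lo hi') := by
    by_cases hc1 : i + W + 1 < n
    · have hhi1 : hi = i + W + 1 := by omega
      have hhi'1 : hi' = hi + 1 := by omega
      have hseg : pvSeg P lo hi' = pvSeg P lo hi ++ [P.getD (i + W + 1) 0] := by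
        rw [hhi'1, hhi1]; exact pvSeg_succ_right P lo (i + W + 1) (by omega) (by omega)
      obtain ⟨hp, hperm⟩ := pvInsort_pairwise_perm w (P.getD (i + W + 1) 0) hwp
      have hw1' : w1 = PySem.List.insert w ((PySem.List.bisectRight w (P.getD (i + W + 1) 0) : Nat) : Int) (P.getD (i + W + 1) 0) := by
        rw [hw1, if_pos hc1]
      refine ⟨hw1' ▸ hp, ?_⟩
      rw [hw1', hseg]
      exact (hperm.trans (hwperm.cons _)).trans (List.perm_append_singleton _ _).symm
    · have hw1' : w1 = w := by rw [hw1, if_neg hc1]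
      have : hi' = hi := by omega
      rw [hw1', this]; exact ⟨hwp, hwperm⟩
  obtain ⟨hmp, hmperm⟩ := hmid
  by_cases hc2 : W ≤ i
  · have hlo' : i + 1 - W = lo + 1 := by omega
    have hseg : pvSeg P lo hi' = P.getD lo 0 :: pvSeg P (lo + 1) hi' := by
      exact pvSeg_succ_left P lo hi' (by omega) (by omega)
    have hx : P.getD lo 0 ∈ w1 := by
      rw [hmperm.mem_iff, hseg]; exact List.mem_cons_self
    rw [if_pos (by omega : (W : Nat) ≤ i), show P.getD (i - W) 0 = P.getD lo 0 from rfl,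
      PySem.List.remove?_eq_some_erase w1 (P.getD lo 0) hx, Option.getD_some]
    have hperm2 : (w1.erase (P.getD lo 0)).Perm (pvSeg P (lo + 1) hi') := by
      have := hmperm.erase (P.getD lo 0)
      rw [hseg] at this
      simpa [List.erase_cons_head] using this
    have hp2 : (w1.erase (P.getD lo 0)).Pairwise (· ≤ ·) :=
      hmp.sublist (List.erase_sublist)
    have : i + 1 + W + 1 = i + W + 2 := by omega
    rw [this, ← hhi', hlo']
    exact pvSorted_eq_of_perm_of_pairwise _ _ hperm2 hp2
  · rw [if_neg (by omega : ¬ (W : Nat) ≤ i)]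
    have hlo' : i + 1 - W = lo := by omega
    have : i + 1 + W + 1 = i + W + 2 := by omega
    rw [this, ← hhi', hlo']
    exact pvSorted_eq_of_perm_of_pairwise _ _ hmperm hmp

-- one A-step equals one B-step on the invariant state, and the window invariant is preserved
lemma pvLoop (P : List Int) (wh md : Int) (W : Nat) (hwh : wh = (W : Int)) :
    ∀ (suffix : List (List (String × Int))) (i : Nat) (kept : List (List (String × Int))),
      i + suffix.length = P.length →
      List.foldl (pvStepA P (P.length : Int) wh md) kept (PySem.List.enumerate suffix (i : Int))
      = (List.foldl (pvStepB P (P.length : Int) wh md)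
          (PySem.List.sorted (pvSeg P (i - W) (min P.length (i + W + 1))) (fun x => x), kept)
          (PySem.List.enumerate suffix (i : Int))).2 := by
  intro suffix
  induction suffix with
  | nil => intro i kept _; simp [PySem.List.enumerate]
  | cons x rest ih =>
    intro i kept hlen
    have hin : i < P.length := by simp at hlen; omega
    rw [PySem.List.enumerate_cons, List.foldl_cons, List.foldl_cons]
    -- A's slice at index i is pvSeg
    have hslice : PySem.List.slice P (some (max 0 ((i : Int) - wh))) (some (min ((P.length : Nat) : Int) ((i : Int) + wh + 1)))
        = pvSeg P (i - W) (min P.length (i + W + 1)) := by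
      have h1 : max 0 ((i : Int) - wh) = ((i - W : Nat) : Int) := by subst hwh; push_cast; omega
      have h2 : min ((P.length : Nat) : Int) ((i : Int) + wh + 1) = ((min P.length (i + W + 1) : Nat) : Int) := by
        subst hwh; push_cast; omega
      rw [h1, h2, PySem.List.slice_natCast]
      rfl
    have hstep : pvStepA P (P.length : Int) wh md kept ((i : Int), x)
        = (pvStepB P (P.length : Int) wh md
            (PySem.List.sorted (pvSeg P (i - W) (min P.length (i + W + 1))) (fun x => x), kept) ((i : Int), x)).2 := by
      simp only [pvStepA, pvStepB, hslice, PySem.List.length_sorted]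
    rw [hstep]
    -- the updated window is the invariant at i+1
    have hwin : (pvStepB P (P.length : Int) wh md
          (PySem.List.sorted (pvSeg P (i - W) (min P.length (i + W + 1))) (fun x => x), kept) ((i : Int), x)).1
        = PySem.List.sorted (pvSeg P (i + 1 - W) (min P.length (i + 1 + W + 1))) (fun x => x) := by
      have hc1iff : ((i : Int) + wh + 1 < ((P.length : Nat) : Int)) ↔ (i + W + 1 < P.length) := by
        subst hwh; constructor <;> intro h <;> [exact_mod_cast h; exact_mod_cast h]
      have hc2iff : (0 ≤ (i : Int) - wh) ↔ (W ≤ i) := by subst hwh; omega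
      have hidx1 : PySem.List.pyGetD P ((i : Int) + wh + 1) 0 = P.getD (i + W + 1) 0 := by
        have : (i : Int) + wh + 1 = ((i + W + 1 : Nat) : Int) := by subst hwh; push_cast; ring
        rw [this, PySem.List.pyGetD_natCast]
      have hidx2 : (W ≤ i) → PySem.List.pyGetD P ((i : Int) - wh) 0 = P.getD (i - W) 0 := by
        intro h
        have : (i : Int) - wh = ((i - W : Nat) : Int) := by subst hwh; push_cast; omega
        rw [this, PySem.List.pyGetD_natCast]
      have hmain := pvWindowStep P W i hin _ _ rfl rfl
      simp only [pvStepB]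
      by_cases hc1 : i + W + 1 < P.length <;> by_cases hc2 : W ≤ i <;>
        simp only [hc1iff, hc2iff, hc1, hc2, if_pos, if_neg, not_false_iff, hidx1] at hmain ⊢ <;>
        simp_all [hidx2]
    generalize hB : pvStepB P (P.length : Int) wh md
        (PySem.List.sorted (pvSeg P (i - W) (min P.length (i + W + 1))) (fun x => x), kept) ((i : Int), x) = st at hwin ⊢
    have hst : st = (st.1, st.2) := rfl
    rw [hst, hwin]
    have : (i : Int) + 1 = ((i + 1 : Nat) : Int) := by push_cast; ring
    rw [this]
    exact ih (i + 1) st.2 (by simp at hlen ⊢; omega)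

-- ===== VERDICT (by name: the statement is the Claim_ definition above) =====
theorem remove_pitch_outliers_py_spec : Claim_equal_remove_pitch_outliers_py := by
  intro notes wh md _ hpre
  unfold Spec_remove_pitch_outliers_py remove_pitch_outliers_py remove_pitch_outliers_py_alt
  by_cases hlen : notes.length < 3
  · simp [hlen]
  · have hwh : 0 ≤ wh := by
      rcases hpre with h | ⟨h, _⟩
      · exact absurd h hlen
      · exact h
    simp only [if_neg hlen]
    set P : List Int := notes.map (fun nt => ((PySem.Dict.mk nt).get? "pitch").getD 0) with hP
    have hPlen : P.length = notes.length := by simp [hP]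
    obtain ⟨W, hW⟩ : ∃ W : Nat, wh = (W : Int) := ⟨wh.toNat, (Int.toNat_of_nonneg hwh).symm⟩
    have hw0 : PySem.List.sorted (PySem.List.slice P none (some (wh + 1))) (fun x => x)
        = PySem.List.sorted (pvSeg P (0 - W) (min P.length (0 + W + 1))) (fun x => x) := by
      have h1 : PySem.List.slice P none (some (wh + 1)) = P.take (W + 1) := by
        have := PySem.List.slice_to P (b := wh + 1) (by omega)
        rw [this]
        congr 1
        subst hW; omega
      have h2 : pvSeg P (0 - W) (min P.length (0 + W + 1)) = P.take (W + 1) := by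
        unfold pvSeg
        simp only [Nat.zero_sub, List.drop_zero, Nat.sub_zero, Nat.zero_add]
        by_cases h : W + 1 ≤ P.length
        · rw [min_eq_right h]
        · rw [min_eq_left (by omega), List.take_of_length_le (le_refl _), List.take_of_length_le (by omega)]
      rw [h1, h2]
    have h := pvLoop P wh md W hW notes 0 [] (by omega)
    simp only [Nat.cast_zero] at h
    rw [← hw0] at h
    rw [show ((notes.length : Nat) : Int) = ((P.length : Nat) : Int) by rw [hPlen]]
    rw [h]
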